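-- pv_equiv track=rewrite | github.com/brydon/brydon.github.io | math1mp/sols-tut6.py | no_spaces
-- ===== SOURCE A (Python) =====
-- def no_spaces(d):
--     output = d.copy()
--     for key in d:
--         if " " in key:
--             old_value = output.pop(key)
--             new_key = key.replace(" ","_")
--             if new_key in d:
--                 output[new_key] += old_value
--     return output
-- ===== SOURCE B (Python) =====
-- def no_spaces(d):
--     # aggregate contributions of space-keys first, then build the result in one comprehension
--     extra = {}
--     for k, v in d.items():
--         if " " in k:
--             nk = k.replace(" ", "_")
--             extra[nk] = extra.get(nk, 0) + v
--     return {k: v + extra.get(k, 0) for k, v in d.items() if " " not in k}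
-- ===== Notes on version B (the rewrite author's own statement) =====
-- stated objective: alternative
-- what changed: A copies the dict and mutates it while iterating (pop each space-key, then increment the underscore key in place); B first aggregates all space-key contributions into a separate dict in one pass and then builds the result in a single filtered comprehension, never mutating an intermediate copy.
import Mathlib
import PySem

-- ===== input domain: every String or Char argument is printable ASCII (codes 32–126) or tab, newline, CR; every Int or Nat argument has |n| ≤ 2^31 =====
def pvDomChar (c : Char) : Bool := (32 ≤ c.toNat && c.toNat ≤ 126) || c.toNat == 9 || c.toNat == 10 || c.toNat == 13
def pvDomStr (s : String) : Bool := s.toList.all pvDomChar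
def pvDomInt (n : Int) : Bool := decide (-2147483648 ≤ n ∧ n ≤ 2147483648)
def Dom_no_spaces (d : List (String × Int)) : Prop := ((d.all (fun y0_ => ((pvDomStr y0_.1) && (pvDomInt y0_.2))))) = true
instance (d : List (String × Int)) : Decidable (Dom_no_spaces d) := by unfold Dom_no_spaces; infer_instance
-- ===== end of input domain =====

-- B replaces A's copy/pop/in-place-increment loop by an aggregate-then-build decomposition
-- (first sum the contributions of the space-keys into a dict, then build the result in one
-- filtered pass); objective: simpler/alternative, same value on every dict.

-- ===== PORT A =====
-- loop body of A: pop a space-containing key from output, add its value to the underscore key if present in d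
def noSpacesStep (dd output : PySem.Dict String Int) (key : String) : PySem.Dict String Int :=
  if PySem.Str.isIn " " key then
    match output.pop? key with
    | some (oldValue, popped) =>
        let newKey := PySem.Str.replace key " " "_"
        if dd.contains newKey then
          match popped.get? newKey with
          | some w => popped.insert newKey (w + oldValue)
          | none => popped   -- unreachable (Python KeyError): newKey ∈ d and has no space, so it is in output
        else popped
    | none => output         -- unreachable (Python KeyError): key is one of d's keys, popped at most once
  else output

def no_spaces (d : List (String × Int)) : List (String × Int) :=
  let dd := PySem.Dict.ofList d
  ((dd.keys).foldl (noSpacesStep dd) dd).items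

-- ===== PORT B =====
def no_spaces_alt (d : List (String × Int)) : List (String × Int) :=
  let dd := PySem.Dict.ofList d
  let extra := dd.items.foldl
    (fun e p =>
      if PySem.Str.isIn " " p.1 then e.modify (PySem.Str.replace p.1 " " "_") 0 (· + p.2) else e)
    PySem.Dict.empty
  (dd.items.filter (fun p => !PySem.Str.isIn " " p.1)).map (fun p => (p.1, p.2 + extra.getD p.1 0))

-- ===== PRECONDITION & SPEC =====
def Spec_no_spaces (d : List (String × Int)) (out : List (String × Int)) : Prop := out = no_spaces_alt d
instance (d : List (String × Int)) (out : List (String × Int)) : Decidable (Spec_no_spaces d out) := by unfold Spec_no_spaces; infer_instance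

-- ===== CLAIM (what is proved, stated in full; the proofs are below) =====
def Claim_equal_no_spaces : Prop := ∀ (d : List (String × Int)), Dom_no_spaces d → Spec_no_spaces d (no_spaces d)

-- ===== LEMMAS AND PROOFS =====

-- `key.replace(" ", "_")` contains no space
lemma go_no_space (fuel : Nat) : ∀ (l acc : List Char), l.length ≤ fuel → ' ' ∉ acc →
    ' ' ∉ PySem.Chars.replace.go [' '] ['_'] fuel l acc := by
  induction fuel with
  | zero =>
    intro l acc hlen hacc
    have : l = [] := List.eq_nil_of_length_eq_zero (Nat.le_zero.mp hlen)
    subst this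
    simpa [PySem.Chars.replace.go] using fun h => hacc (List.mem_reverse.mp h)
  | succ n ih =>
    intro l acc hlen hacc
    cases l with
    | nil => simpa [PySem.Chars.replace.go] using fun h => hacc (List.mem_reverse.mp h)
    | cons c t =>
      by_cases hc : c = ' '
      · subst hc
        have hpre : [' '].isPrefixOf (' ' :: t) = true := by simp [List.isPrefixOf]
        simpa [PySem.Chars.replace.go, hpre] using
          ih t ('_' :: acc) (by simpa using Nat.le_of_succ_le_succ hlen)
            (by simpa using hacc)
      · have hpre : [' '].isPrefixOf (c :: t) = false := by
          simp only [List.isPrefixOf, Bool.and_eq_false_iff, beq_eq_false_iff_ne, ne_eq]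
          exact Or.inl fun h => hc h.symm
        simpa [PySem.Chars.replace.go, hpre] using
          ih t (c :: acc) (by simpa using Nat.le_of_succ_le_succ hlen)
            (by simpa [hacc] using fun h => hc h.symm)

lemma replace_no_space (k : String) :
    PySem.Str.isIn " " (PySem.Str.replace k " " "_") = false := by
  rw [Bool.eq_false_iff]
  intro h
  rw [PySem.Str.isIn_iff_infix, PySem.Str.toList_replace] at h
  have hmem : ' ' ∈ PySem.Chars.replace k.toList " ".toList "_".toList := by
    have := (List.singleton_infix_iff ' ' _).mp (by simpa using h)
    exact this
  have : ' ' ∉ PySem.Chars.replace.go [' '] ['_'] k.toList.length k.toList [] :=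
    go_no_space _ _ _ le_rfl (by simp)
  exact this (by simpa [PySem.Chars.replace] using hmem)

-- on the erased dict, lookups at other keys are unchanged
lemma find?_filter_ne {ν : Type} (l : List (String × ν)) (k x : String) (hxk : x ≠ k) :
    List.find? (fun p => p.1 == x) (l.filter (fun p => !(p.1 == k)))
      = List.find? (fun p => p.1 == x) l := by
  induction l with
  | nil => rfl
  | cons p t ih =>
    by_cases hpk : p.1 = k
    · have hx : (p.1 == x) = false := by
        simp only [beq_eq_false_iff_ne, ne_eq, hpk]
        exact fun h => hxk h.symm
      rw [List.filter_cons_of_neg (by simp [hpk]), ih,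
        List.find?_cons_of_neg (by simp [hx])]
    · rw [List.filter_cons_of_pos (by simp [hpk])]
      by_cases hpx : p.1 = x
      · rw [List.find?_cons_of_pos (by simp [hpx]), List.find?_cons_of_pos (by simp [hpx])]
      · rw [List.find?_cons_of_neg (by simp [hpx]), List.find?_cons_of_neg (by simp [hpx]), ih]

lemma get?_erase_of_ne (d : PySem.Dict String Int) (k x : String) (hxk : x ≠ k) :
    (d.erase k).get? x = d.get? x := by
  simp only [PySem.Dict.get?, PySem.Dict.erase]
  rw [find?_filter_ne _ _ _ hxk]

lemma nodup_keys_erase (d : PySem.Dict String Int) (k : String) (h : d.keys.Nodup) :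
    (d.erase k).keys.Nodup := by
  have hsub : (d.erase k).keys.Sublist d.keys := by
    simpa [PySem.Dict.keys, PySem.Dict.erase] using
      (List.filter_sublist (l := d.items) (p := fun p => !(p.1 == k))).map (fun p => p.1)
  exact h.sublist hsub

-- contribution of the space-keys among ks that map (by replace) to x
def contribC (dd : PySem.Dict String Int) (ks : List String) (x : String) : Int :=
  ((ks.filter (fun k => PySem.Str.isIn " " k && (PySem.Str.replace k " " "_" == x))).map
    (fun k => dd.getD k 0)).sum

lemma contrib_cons_of_not_space (dd : PySem.Dict String Int) (k : String) (ks : List String)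
    (x : String) (hk : PySem.Str.isIn " " k = false) :
    contribC dd (k :: ks) x = contribC dd ks x := by
  unfold contribC
  rw [List.filter_cons_of_neg (by
    intro hcontra
    rw [Bool.and_eq_true] at hcontra
    rw [hk] at hcontra
    exact Bool.false_ne_true hcontra.1)]

lemma contrib_cons_of_ne (dd : PySem.Dict String Int) (k : String) (ks : List String)
    (x : String) (hx : PySem.Str.replace k " " "_" ≠ x) :
    contribC dd (k :: ks) x = contribC dd ks x := by
  unfold contribC
  rw [List.filter_cons_of_neg (by
    intro hcontra
    rw [Bool.and_eq_true, beq_iff_eq] at hcontra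
    exact hx hcontra.2)]

lemma contrib_cons_of_space (dd : PySem.Dict String Int) (k : String) (ks : List String)
    (hk : PySem.Str.isIn " " k = true) :
    contribC dd (k :: ks) (PySem.Str.replace k " " "_")
      = dd.getD k 0 + contribC dd ks (PySem.Str.replace k " " "_") := by
  unfold contribC
  rw [List.filter_cons_of_pos (by rw [Bool.and_eq_true]; exact ⟨hk, beq_self_eq_true _⟩),
    List.map_cons, List.sum_cons]

-- the main loop invariant for A's fold
lemma loopA (dd : PySem.Dict String Int) (ks : List String) :
    ∀ (out : PySem.Dict String Int),
      ks.Nodup →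
      out.keys.Nodup →
      (∀ k ∈ ks, PySem.Str.isIn " " k = true → out.get? k = dd.get? k ∧ dd.contains k = true) →
      (∀ x : String, PySem.Str.isIn " " x = false → out.contains x = dd.contains x) →
      (ks.foldl (noSpacesStep dd) out).items
        = (out.items.filter (fun p => !(PySem.Str.isIn " " p.1 && decide (p.1 ∈ ks)))).map
            (fun p => (p.1, p.2 + contribC dd ks p.1)) := by
  induction ks with
  | nil =>
    intro out _ _ _ _
    simp only [List.foldl_nil, List.not_mem_nil, decide_false, Bool.and_false, Bool.not_false,
      List.filter_true, contribC, List.filter_nil, List.map_nil, List.sum_nil, add_zero]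
    have hid : (fun (p : String × Int) => (p.1, p.2)) = (id : String × Int → String × Int) :=
      funext fun p => rfl
    rw [hid, List.map_id]
  | cons k ks' ih =>
    intro out hnd hout h2 h3
    obtain ⟨hk_notmem, hnd'⟩ := List.nodup_cons.mp hnd
    rw [List.foldl_cons]
    by_cases hk : PySem.Str.isIn " " k = true
    · -- k contains a space: it is popped and maybe merged
      obtain ⟨hget, hdk⟩ := h2 k List.mem_cons_self hk
      have hvsome : (dd.get? k).isSome = true := by
        rw [← PySem.Dict.contains_eq_isSome_get?]; exact hdk
      obtain ⟨v, hv⟩ := Option.isSome_iff_exists.mp hvsome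
      have hov : out.get? k = some v := by rw [hget, hv]
      have hnsp : PySem.Str.isIn " " (PySem.Str.replace k " " "_") = false := replace_no_space k
      have hknk : PySem.Str.replace k " " "_" ≠ k := by
        intro h; rw [h, hk] at hnsp; exact absurd hnsp (by decide)
      have hEnodup := nodup_keys_erase out k hout
      have hEget : ∀ x, x ≠ k → (out.erase k).get? x = out.get? x :=
        fun x hx => get?_erase_of_ne out k x hx
      have hpop : out.pop? k = some (v, out.erase k) := by
        unfold PySem.Dict.pop?; rw [hov]; rfl
      by_cases hc : dd.contains (PySem.Str.replace k " " "_") = true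
      · -- the underscore key exists in d: its value is bumped in place
        have houtnk : out.contains (PySem.Str.replace k " " "_") = true := by
          rw [h3 _ hnsp]; exact hc
        have hEcontnk : (out.erase k).contains (PySem.Str.replace k " " "_") = true := by
          rw [PySem.Dict.contains_eq_isSome_get?, hEget _ hknk,
            ← PySem.Dict.contains_eq_isSome_get?]
          exact houtnk
        have hwsome : ((out.erase k).get? (PySem.Str.replace k " " "_")).isSome = true := by
          rw [← PySem.Dict.contains_eq_isSome_get?]; exact hEcontnk
        obtain ⟨w, hw⟩ := Option.isSome_iff_exists.mp hwsome
        have hstep : noSpacesStep dd out k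
            = (out.erase k).insert (PySem.Str.replace k " " "_") (w + v) := by
          unfold noSpacesStep
          rw [if_pos hk, hpop]
          dsimp only
          rw [if_pos hc, hw]
        have houtnkw : out.get? (PySem.Str.replace k " " "_") = some w := by
          rw [← hEget _ hknk]; exact hw
        rw [hstep, ih _ hnd'
          (PySem.Dict.nodup_keys_insert _ _ _ hEnodup)
          (fun k' hm hsp => by
            have hne_nk : k' ≠ PySem.Str.replace k " " "_" := by
              intro h; rw [h, hnsp] at hsp; exact Bool.false_ne_true hsp
            have hne_k : k' ≠ k := fun h => hk_notmem (h ▸ hm)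
            rw [PySem.Dict.get?_insert_of_ne _ _ hne_nk, hEget _ hne_k]
            exact h2 k' (List.mem_cons_of_mem _ hm) hsp)
          (fun x hx => by
            by_cases hxnk : x = PySem.Str.replace k " " "_"
            · rw [hxnk, PySem.Dict.contains_insert_self]; exact hc.symm
            · have hxk : x ≠ k := by
                intro h; rw [h, hk] at hx; exact absurd hx (by decide)
              rw [PySem.Dict.contains_eq_isSome_get?, PySem.Dict.get?_insert_of_ne _ _ hxnk,
                hEget _ hxk, ← PySem.Dict.contains_eq_isSome_get?]
              exact h3 x hx)]
        rw [PySem.Dict.items_insert_of_contains _ _ hEcontnk]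
        show ((((out.items.filter _).map _).filter _).map _) = _
        rw [List.filter_map, List.filter_filter, List.map_map]
        rw [List.filter_congr (l := out.items)
            (q := fun p => !(PySem.Str.isIn " " p.1 && decide (p.1 ∈ k :: ks'))) (by
          intro p _
          have hgfst : ((if (p.1 == PySem.Str.replace k " " "_") = true
              then (PySem.Str.replace k " " "_", w + v) else p) : String × Int).1 = p.1 := by
            by_cases hb : (p.1 == PySem.Str.replace k " " "_") = true
            · rw [if_pos hb]; exact (beq_iff_eq.mp hb).symm
            · rw [if_neg hb]
          simp only [Function.comp, hgfst]
          by_cases hpk : p.1 = k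
          · simp only [hpk, beq_self_eq_true, Bool.not_true, Bool.and_false, hk,
              List.mem_cons, true_or, decide_true, Bool.true_and]
          · have hb : (p.1 == k) = false := beq_eq_false_iff_ne.mpr hpk
            simp only [List.mem_cons, hpk, false_or, hb, Bool.not_false, Bool.and_true])]
        apply List.map_congr_left
        intro p hp
        have hpmem : p ∈ out.items := List.mem_of_mem_filter hp
        simp only [Function.comp]
        by_cases hpnk : p.1 = PySem.Str.replace k " " "_"
        · have hbeq : (p.1 == PySem.Str.replace k " " "_") = true := beq_iff_eq.mpr hpnk
          have hpw : p.2 = w := by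
            have hmem' : (p.1, p.2) ∈ out.items := by
              have : p = (p.1, p.2) := rfl
              rw [← this]; exact hpmem
            have := PySem.Dict.get?_of_mem_items out hmem' hout
            rw [hpnk, houtnkw] at this
            exact (Option.some_inj.mp this).symm
          have hgv : dd.getD k 0 = v := by unfold PySem.Dict.getD; rw [hv]; rfl
          rw [if_pos hbeq]
          show (PySem.Str.replace k " " "_",
              w + v + contribC dd ks' (PySem.Str.replace k " " "_"))
            = (p.1, p.2 + contribC dd (k :: ks') p.1)
          rw [hpnk, hpw, contrib_cons_of_space dd k ks' hk, hgv, add_assoc]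
        · have hbeq : (p.1 == PySem.Str.replace k " " "_") = false := beq_eq_false_iff_ne.mpr hpnk
          rw [if_neg (by rw [hbeq]; exact Bool.false_ne_true)]
          rw [contrib_cons_of_ne dd k ks' p.1 (fun h => hpnk h.symm)]
      · -- the underscore key is absent from d: the popped value is dropped
        have hstep : noSpacesStep dd out k = out.erase k := by
          unfold noSpacesStep
          rw [if_pos hk, hpop]
          dsimp only
          rw [if_neg hc]
        have houtnk : out.contains (PySem.Str.replace k " " "_") = false := by
          rw [h3 _ hnsp]
          exact (Bool.not_eq_true _).mp hc
        rw [hstep, ih _ hnd' hEnodup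
          (fun k' hm hsp => by
            have hne_k : k' ≠ k := fun h => hk_notmem (h ▸ hm)
            rw [hEget _ hne_k]
            exact h2 k' (List.mem_cons_of_mem _ hm) hsp)
          (fun x hx => by
            have hxk : x ≠ k := by
              intro h; rw [h, hk] at hx; exact absurd hx (by decide)
            rw [PySem.Dict.contains_eq_isSome_get?, hEget _ hxk,
              ← PySem.Dict.contains_eq_isSome_get?]
            exact h3 x hx)]
        show (((out.items.filter _).filter _).map _) = _
        rw [List.filter_filter]
        rw [List.filter_congr (l := out.items)
            (q := fun p => !(PySem.Str.isIn " " p.1 && decide (p.1 ∈ k :: ks'))) (by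
          intro p _
          by_cases hpk : p.1 = k
          · simp only [hpk, beq_self_eq_true, Bool.not_true, Bool.and_false, hk,
              List.mem_cons, true_or, decide_true, Bool.true_and]
          · have hb : (p.1 == k) = false := beq_eq_false_iff_ne.mpr hpk
            simp only [List.mem_cons, hpk, false_or, hb, Bool.not_false, Bool.and_true])]
        apply List.map_congr_left
        intro p hp
        have hpmem : p ∈ out.items := List.mem_of_mem_filter hp
        have hpnk : p.1 ≠ PySem.Str.replace k " " "_" := by
          intro h
          have hmemk : p.1 ∈ out.keys := List.mem_map_of_mem hpmem
          rw [← PySem.Dict.contains_iff_mem_keys, h, houtnk] at hmemk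
          exact Bool.false_ne_true hmemk
        rw [contrib_cons_of_ne dd k ks' p.1 (fun h => hpnk h.symm)]
    · -- k has no space: nothing happens in this iteration
      have hk' : PySem.Str.isIn " " k = false := (Bool.not_eq_true _).mp hk
      have hstep : noSpacesStep dd out k = out := by
        unfold noSpacesStep; rw [if_neg hk]
      rw [hstep, ih out hnd' hout
        (fun k' hm hsp => h2 k' (List.mem_cons_of_mem _ hm) hsp) h3]
      rw [List.filter_congr (l := out.items)
          (q := fun p => !(PySem.Str.isIn " " p.1 && decide (p.1 ∈ k :: ks'))) (by
        intro p _
        by_cases hsp : PySem.Str.isIn " " p.1 = true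
        · have hpk : ¬ p.1 = k := by
            intro h; rw [h, hk'] at hsp; exact Bool.false_ne_true hsp
          simp only [List.mem_cons, hpk, false_or]
        · have h0 : PySem.Str.isIn " " p.1 = false := (Bool.not_eq_true _).mp hsp
          simp only [h0, Bool.false_and, Bool.not_false])]
      apply List.map_congr_left
      intro p _
      rw [contrib_cons_of_not_space dd k ks' p.1 hk']

-- the characterization of B's `extra` dict
lemma extra_getD (l : List (String × Int)) :
    ∀ (e : PySem.Dict String Int) (x : String),
      (l.foldl (fun e p =>
          if PySem.Str.isIn " " p.1 then e.modify (PySem.Str.replace p.1 " " "_") 0 (· + p.2) else e) e).getD x 0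
        = e.getD x 0
          + ((l.filter (fun p => PySem.Str.isIn " " p.1 && (PySem.Str.replace p.1 " " "_" == x))).map
              (fun p => p.2)).sum := by
  induction l with
  | nil => intro e x; simp
  | cons p t ih =>
    intro e x
    by_cases hs : PySem.Str.isIn " " p.1 = true
    · simp only [List.foldl_cons, hs, if_true]
      rw [ih, PySem.Dict.getD_modify]
      by_cases hx : PySem.Str.replace p.1 " " "_" = x
      · rw [if_pos hx.symm, hx,
          List.filter_cons_of_pos (by simp only [Bool.and_eq_true, beq_iff_eq]; exact ⟨hs, hx⟩),
          List.map_cons, List.sum_cons]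
        ring
      · rw [if_neg (fun h => hx h.symm),
          List.filter_cons_of_neg (by simp only [Bool.and_eq_true, beq_iff_eq, not_and]; exact fun _ => hx)]
    · rw [List.foldl_cons, if_neg hs, ih,
        List.filter_cons_of_neg (by simp only [Bool.and_eq_true, not_and]; exact fun h => absurd h hs)]

-- B's extra-dict lookup computes exactly the contribution sum of A's loop
lemma contrib_eq_extra (dd : PySem.Dict String Int) (hnd : dd.keys.Nodup) (x : String) :
    contribC dd dd.keys x
      = (dd.items.foldl
          (fun e p =>
            if PySem.Str.isIn " " p.1 then e.modify (PySem.Str.replace p.1 " " "_") 0 (· + p.2) else e)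
          PySem.Dict.empty).getD x 0 := by
  rw [extra_getD, PySem.Dict.getD_empty, zero_add]
  unfold contribC PySem.Dict.keys
  rw [List.filter_map, List.map_map]
  rw [List.filter_congr (q := fun p : String × Int =>
      PySem.Str.isIn " " p.1 && (PySem.Str.replace p.1 " " "_" == x)) (fun p _ => rfl)]
  apply congrArg
  apply List.map_congr_left
  intro p hp
  have hpmem : (p.1, p.2) ∈ dd.items := List.mem_of_mem_filter hp
  exact PySem.Dict.getD_of_mem_items dd hpmem hnd 0

-- ===== VERDICT (by name: the statement is the Claim_ definition above) =====
theorem no_spaces_spec : Claim_equal_no_spaces := by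
  intro d _
  unfold Spec_no_spaces no_spaces no_spaces_alt
  have hnd := PySem.Dict.nodup_keys_ofList (κ := String) (ν := Int) d
  rw [loopA (PySem.Dict.ofList d) (PySem.Dict.ofList d).keys (PySem.Dict.ofList d) hnd hnd
      (fun k hm hsp => ⟨rfl, (PySem.Dict.contains_iff_mem_keys _ k).mpr hm⟩)
      (fun x _ => rfl)]
  rw [List.filter_congr (q := fun p : String × Int => !PySem.Str.isIn " " p.1) (by
    intro p hp
    have hm : p.1 ∈ (PySem.Dict.ofList d).keys := List.mem_map_of_mem hp
    simp only [hm, decide_true, Bool.and_true])]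
  apply List.map_congr_left
  intro p _
  rw [contrib_eq_extra (PySem.Dict.ofList d) hnd p.1]
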